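-- pv_equiv track=rewrite | github.com/xg82/Advent-of-Code | 2024/18/AoC_Day18.py | grid_generate
-- ===== SOURCE A (Python) =====
-- def grid_generate(byte_on_grid_all, bytes_fallen, ro, co):
--
--     grid = {}
--     byte_on_grid = byte_on_grid_all[0:bytes_fallen]
--     for r in range(ro):
--         grid[r]={}
--         for c in range(co):
--             grid[r].setdefault(c," ")
--             if (r,c) in byte_on_grid:
--                 grid[r][c]="#"
--     return grid
-- ===== SOURCE B (Python) =====
-- def grid_generate(byte_on_grid_all, bytes_fallen, ro, co):
--     grid = {r: {c: " " for c in range(co)} for r in range(ro)}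
--     for r, c in byte_on_grid_all[:bytes_fallen]:
--         if 0 <= r < ro and 0 <= c < co:
--             grid[r][c] = "#"
--     return grid
-- ===== Notes on version B (the rewrite author's own statement) =====
-- stated objective: faster
-- what changed: Instead of testing every grid cell for membership in the fallen-byte list (ro*co list scans), B fills the whole grid with spaces up front and then scatters '#' over the fallen bytes in one pass, skipping out-of-range coordinates just as A's membership test never matches them.
import Mathlib
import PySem

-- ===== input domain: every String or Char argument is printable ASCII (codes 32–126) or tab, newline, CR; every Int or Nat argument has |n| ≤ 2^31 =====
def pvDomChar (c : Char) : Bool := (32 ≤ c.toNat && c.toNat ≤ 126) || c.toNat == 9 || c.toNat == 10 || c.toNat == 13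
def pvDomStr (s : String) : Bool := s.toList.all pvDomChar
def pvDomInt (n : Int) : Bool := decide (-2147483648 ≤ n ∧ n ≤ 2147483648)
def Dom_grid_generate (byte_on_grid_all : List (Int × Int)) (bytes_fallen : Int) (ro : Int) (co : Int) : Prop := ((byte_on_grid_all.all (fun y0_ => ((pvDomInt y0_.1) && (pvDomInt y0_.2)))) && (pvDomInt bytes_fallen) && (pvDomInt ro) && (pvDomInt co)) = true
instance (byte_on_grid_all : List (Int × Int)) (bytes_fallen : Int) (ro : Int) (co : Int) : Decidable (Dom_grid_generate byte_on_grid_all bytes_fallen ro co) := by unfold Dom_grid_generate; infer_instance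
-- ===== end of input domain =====

-- B fills the whole grid with spaces up front and then scatters '#' over the fallen bytes in one
-- pass, instead of A's per-cell membership scan over the byte list (objective: faster).


-- ===== PORT A =====
def grid_generate (byte_on_grid_all : List (Int × Int)) (bytes_fallen : Int) (ro : Int) (co : Int) : List (Int × List (Int × String)) :=
  let byte_on_grid := PySem.List.slice byte_on_grid_all (some 0) (some bytes_fallen)
  let grid : PySem.Dict Int (PySem.Dict Int String) :=
    (PySem.List.pyRange 0 ro 1).foldl (fun g r =>
      let row : PySem.Dict Int String :=
        (PySem.List.pyRange 0 co 1).foldl (fun row c =>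
          let row' := row.setdefault c " "
          if (r, c) ∈ byte_on_grid then row'.insert c "#" else row')
        PySem.Dict.empty
      g.insert r row)
    PySem.Dict.empty
  grid.items.map (fun p => (p.1, p.2.items))

-- ===== PORT B =====
-- grid[r][c] = "#" on the nested association lists (keys are distinct, from range)
def bSetCell (g : List (Int × List (Int × String))) (r c : Int) : List (Int × List (Int × String)) :=
  g.map (fun row => if row.1 = r then (row.1, row.2.map (fun cell => if cell.1 = c then (cell.1, "#") else cell)) else row)

def grid_generate_alt (byte_on_grid_all : List (Int × Int)) (bytes_fallen : Int) (ro : Int) (co : Int) : List (Int × List (Int × String)) :=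
  let grid : List (Int × List (Int × String)) :=
    (PySem.List.pyRange 0 ro 1).map (fun r => (r, (PySem.List.pyRange 0 co 1).map (fun c => (c, " "))))
  (PySem.List.slice byte_on_grid_all none (some bytes_fallen)).foldl
    (fun g p => if 0 ≤ p.1 ∧ p.1 < ro ∧ 0 ≤ p.2 ∧ p.2 < co then bSetCell g p.1 p.2 else g)
    grid

-- ===== PRECONDITION & SPEC =====
def Spec_grid_generate (byte_on_grid_all : List (Int × Int)) (bytes_fallen : Int) (ro : Int) (co : Int) (out : List (Int × List (Int × String))) : Prop := out = grid_generate_alt byte_on_grid_all bytes_fallen ro co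
instance (byte_on_grid_all : List (Int × Int)) (bytes_fallen : Int) (ro : Int) (co : Int) (out : List (Int × List (Int × String))) : Decidable (Spec_grid_generate byte_on_grid_all bytes_fallen ro co out) := by unfold Spec_grid_generate; infer_instance

-- ===== CLAIM (what is proved, stated in full; the proofs are below) =====
def Claim_equal_grid_generate : Prop := ∀ (byte_on_grid_all : List (Int × Int)) (bytes_fallen : Int) (ro : Int) (co : Int), Dom_grid_generate byte_on_grid_all bytes_fallen ro co → Spec_grid_generate byte_on_grid_all bytes_fallen ro co (grid_generate byte_on_grid_all bytes_fallen ro co)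

-- ===== LEMMAS AND PROOFS =====

-- A's inner loop over a fresh row: setdefault-then-maybe-overwrite appends one decided cell per key
lemma rowFold (S : List (Int × Int)) (r : Int) :
    ∀ (cs : List Int) (row : PySem.Dict Int String), cs.Nodup → (∀ c ∈ cs, row.contains c = false) →
    (cs.foldl (fun row c =>
        if (r, c) ∈ S then (row.setdefault c " ").insert c "#" else row.setdefault c " ") row).items
      = row.items ++ cs.map (fun c => (c, if (r, c) ∈ S then "#" else " ")) := by
  intro cs
  induction cs with
  | nil => intro row _ _; simp
  | cons c cs ih =>
    intro row hnd hfresh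
    have hc : row.contains c = false := hfresh c (List.mem_cons_self)
    have hstep : (if (r, c) ∈ S then (row.setdefault c " ").insert c "#" else row.setdefault c " ")
        = row.insert c (if (r, c) ∈ S then "#" else " ") := by
      rw [PySem.Dict.setdefault_of_not_contains _ _ hc]
      split_ifs with hm
      · apply PySem.Dict.ext
        rw [PySem.Dict.items_insert_of_contains _ _ (PySem.Dict.contains_insert_self _ _ _),
            PySem.Dict.items_insert_of_not_contains _ _ hc,
            PySem.Dict.items_insert_of_not_contains _ _ hc]
        have hne : ∀ p ∈ row.items, (p.1 == c) = false := by
          intro p hp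
          have : c ∉ row.keys := by
            intro h; exact absurd ((PySem.Dict.contains_iff_mem_keys row c).mpr h) (by simp [hc])
          have : p.1 ≠ c := by
            intro h; exact this (h ▸ List.mem_map_of_mem hp)
          simpa using this
        simp only [List.map_append]
        rw [List.map_congr_left (fun p hp => by simp [hne p hp] : ∀ p ∈ row.items, _ = id p)]
        simp
      · rfl
    simp only [List.foldl_cons, hstep]
    rw [ih _ (List.nodup_cons.mp hnd).2 ?fresh]
    · rw [PySem.Dict.items_insert_of_not_contains _ _ hc]
      simp
    case fresh =>
      intro c' hc'
      rw [PySem.Dict.contains_insert]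
      have : c' ≠ c := fun h => (List.nodup_cons.mp hnd).1 (h ▸ hc')
      simp [this, hfresh c' (List.mem_cons_of_mem _ hc')]

-- B's scatter loop over any grid of range-shaped rows
lemma scatterFold (ro co : Int) :
    ∀ (S : List (Int × Int)) (f : Int → Int → String),
    S.foldl (fun g p => if 0 ≤ p.1 ∧ p.1 < ro ∧ 0 ≤ p.2 ∧ p.2 < co then bSetCell g p.1 p.2 else g)
      ((PySem.List.pyRange 0 ro 1).map (fun r => (r, (PySem.List.pyRange 0 co 1).map (fun c => (c, f r c)))))
    = (PySem.List.pyRange 0 ro 1).map (fun r => (r, (PySem.List.pyRange 0 co 1).map (fun c =>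
        (c, if ((0:Int) ≤ r ∧ r < ro ∧ 0 ≤ c ∧ c < co) ∧ (r, c) ∈ S then "#" else f r c)))) := by
  intro S
  induction S with
  | nil => intro f; simp
  | cons p S ih =>
    obtain ⟨pr, pc⟩ := p
    intro f
    simp only [List.foldl_cons]
    by_cases hp : (0:Int) ≤ pr ∧ pr < ro ∧ 0 ≤ pc ∧ pc < co
    · rw [if_pos hp]
      have hset : bSetCell ((PySem.List.pyRange 0 ro 1).map (fun r => (r, (PySem.List.pyRange 0 co 1).map (fun c => (c, f r c))))) pr pc
          = (PySem.List.pyRange 0 ro 1).map (fun r => (r, (PySem.List.pyRange 0 co 1).map (fun c => (c, if r = pr ∧ c = pc then "#" else f r c)))) := by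
        unfold bSetCell
        rw [List.map_map]
        apply List.map_congr_left
        intro r _
        simp only [Function.comp]
        by_cases hr : r = pr
        · subst hr
          rw [if_pos rfl]
          simp only [List.map_map]
          refine congrArg _ ?_
          apply List.map_congr_left
          intro c _
          simp only [Function.comp]
          by_cases hcc : c = pc
          · subst hcc; simp
          · simp [hcc]
        · rw [if_neg hr]
          refine congrArg _ ?_
          apply List.map_congr_left
          intro c _
          have hn : ¬(r = pr ∧ c = pc) := fun h => hr h.1
          simp [hn]
      rw [hset, ih]
      apply List.map_congr_left
      intro r _
      refine congrArg _ ?_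
      apply List.map_congr_left
      intro c _
      refine congrArg _ ?_
      simp only [List.mem_cons, Prod.mk.injEq]
      by_cases hm : r = pr ∧ c = pc
      · obtain ⟨h1, h2⟩ := hm; subst h1; subst h2
        simp [hp]
      · simp [hm]
    · rw [if_neg hp, ih]
      apply List.map_congr_left
      intro r _
      refine congrArg _ ?_
      apply List.map_congr_left
      intro c _
      refine congrArg _ ?_
      simp only [List.mem_cons, Prod.mk.injEq]
      by_cases hm : r = pr ∧ c = pc
      · obtain ⟨h1, h2⟩ := hm; subst h1; subst h2
        simp [hp]
      · simp [hm]

-- A's whole result, cell by cell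
lemma gridA_eq (all : List (Int × Int)) (bf ro co : Int) :
    grid_generate all bf ro co
      = (PySem.List.pyRange 0 ro 1).map (fun r => (r, (PySem.List.pyRange 0 co 1).map (fun c =>
          (c, if (r, c) ∈ PySem.List.slice all (some 0) (some bf) then "#" else " ")))) := by
  unfold grid_generate
  simp only []
  rw [PySem.Dict.items_foldl_insert_fresh (PySem.List.pyRange 0 ro 1) (fun r : Int => r)
      (fun r => (PySem.List.pyRange 0 co 1).foldl (fun row c =>
          if (r, c) ∈ PySem.List.slice all (some 0) (some bf) then (row.setdefault c " ").insert c "#" else row.setdefault c " ")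
        PySem.Dict.empty)
      PySem.Dict.empty (fun _ _ => PySem.Dict.contains_empty _)
      (by simpa using PySem.List.nodup_pyRange_one 0 ro)]
  simp only [show (PySem.Dict.empty : PySem.Dict Int (PySem.Dict Int String)).items = [] from rfl,
    List.nil_append, List.map_map]
  apply List.map_congr_left
  intro r _
  simp only [Function.comp]
  refine congrArg _ ?_
  rw [rowFold (PySem.List.slice all (some 0) (some bf)) r (PySem.List.pyRange 0 co 1)
      PySem.Dict.empty (PySem.List.nodup_pyRange_one 0 co) (fun _ _ => PySem.Dict.contains_empty _)]
  simp [show (PySem.Dict.empty : PySem.Dict Int String).items = [] from rfl]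

-- ===== VERDICT (by name: the statement is the Claim_ definition above) =====
theorem grid_generate_spec : Claim_equal_grid_generate := by
  intro all bf ro co _
  unfold Spec_grid_generate
  rw [gridA_eq]
  unfold grid_generate_alt
  have h := scatterFold ro co (PySem.List.slice all none (some bf)) (fun _ _ => " ")
  simp only [] at h
  rw [h]
  apply List.map_congr_left
  intro r hr
  refine congrArg _ ?_
  apply List.map_congr_left
  intro c hc
  rw [PySem.List.mem_pyRange_one] at hr hc
  simp [hr.1, hr.2, hc.1, hc.2]
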